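-- pv_equiv track=rewrite | github.com/ivansamofal/seo-billing-python | src/domain/pricing/tariff_pricing_strategy.py | _project_surcharge
-- ===== SOURCE A (Python) =====
-- PROJECT_PRICE_TIERS = [
--     (20,  66),
--     (40,  33),
--     (100, 17),
--     (None, 8),
-- ]
--
-- FREE_PROJECT_ALLOWANCE = 5  # projects included in base price
--
-- def _project_surcharge(project_count: int) -> int:
--     if project_count <= FREE_PROJECT_ALLOWANCE:
--         return 0
--
--     extra = project_count - FREE_PROJECT_ALLOWANCE
--     surcharge = 0
--     tier_start = FREE_PROJECT_ALLOWANCE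
--
--     for tier_max, price_per_package in PROJECT_PRICE_TIERS:
--         if extra <= 0:
--             break
--         if tier_max is None:
--             surcharge += extra * price_per_package
--             break
--         tier_capacity = tier_max - tier_start
--         charged = min(extra, tier_capacity)
--         surcharge += charged * price_per_package
--         extra -= charged
--         tier_start = tier_max
--
--     return surcharge
-- ===== SOURCE B (Python) =====
-- FREE_PROJECT_ALLOWANCE = 5
--
-- def _project_surcharge(project_count: int) -> int:
--     if project_count <= FREE_PROJECT_ALLOWANCE:
--         return 0
--     if project_count <= 20:
--         return (project_count - 5) * 66
--     if project_count <= 40: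
--         return 15 * 66 + (project_count - 20) * 33
--     if project_count <= 100:
--         return 15 * 66 + 20 * 33 + (project_count - 40) * 17
--     return 15 * 66 + 20 * 33 + 60 * 17 + (project_count - 100) * 8
-- ===== Notes on version B (the rewrite author's own statement) =====
-- stated objective: simpler
-- what changed: Replaces the loop over the tier table with direct closed-form range branches (breakpoint constants precomputed).
import Mathlib
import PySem

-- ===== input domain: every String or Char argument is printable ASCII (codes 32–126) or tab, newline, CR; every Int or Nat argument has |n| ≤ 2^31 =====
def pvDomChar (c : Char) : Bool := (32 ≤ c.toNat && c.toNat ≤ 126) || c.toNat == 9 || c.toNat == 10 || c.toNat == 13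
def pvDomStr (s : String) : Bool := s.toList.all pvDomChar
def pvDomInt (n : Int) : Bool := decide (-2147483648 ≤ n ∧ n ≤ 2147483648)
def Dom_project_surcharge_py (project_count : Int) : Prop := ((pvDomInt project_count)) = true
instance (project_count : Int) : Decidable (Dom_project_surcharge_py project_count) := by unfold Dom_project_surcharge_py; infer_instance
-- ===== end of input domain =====

-- B replaces A's loop over the tier table with closed-form range branches (same values, simpler).


-- ===== PORT A =====
def PROJECT_PRICE_TIERS : List (Option Int × Int) :=
  [(some 20, 66), (some 40, 33), (some 100, 17), (none, 8)]

def FREE_PROJECT_ALLOWANCE : Int := 5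

-- the for-loop with its two breaks, as structural recursion over the tier list
def surchargeLoop : List (Option Int × Int) → Int → Int → Int → Int
  | [], _, surcharge, _ => surcharge
  | (tier_max, price_per_package) :: rest, extra, surcharge, tier_start =>
    if extra ≤ 0 then surcharge
    else
      match tier_max with
      | none => surcharge + extra * price_per_package
      | some tm =>
        let tier_capacity := tm - tier_start
        let charged := min extra tier_capacity
        surchargeLoop rest (extra - charged) (surcharge + charged * price_per_package) tm

def project_surcharge_py (project_count : Int) : Int :=
  if project_count ≤ FREE_PROJECT_ALLOWANCE then 0
  else surchargeLoop PROJECT_PRICE_TIERS (project_count - FREE_PROJECT_ALLOWANCE) 0 FREE_PROJECT_ALLOWANCE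

-- ===== PORT B =====
def project_surcharge_py_alt (project_count : Int) : Int :=
  if project_count ≤ 5 then 0
  else if project_count ≤ 20 then (project_count - 5) * 66
  else if project_count ≤ 40 then 15 * 66 + (project_count - 20) * 33
  else if project_count ≤ 100 then 15 * 66 + 20 * 33 + (project_count - 40) * 17
  else 15 * 66 + 20 * 33 + 60 * 17 + (project_count - 100) * 8

-- ===== PRECONDITION & SPEC =====
def Spec_project_surcharge_py (project_count : Int) (out : Int) : Prop := out = project_surcharge_py_alt project_count
instance (project_count : Int) (out : Int) : Decidable (Spec_project_surcharge_py project_count out) := by unfold Spec_project_surcharge_py; infer_instance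

-- ===== CLAIM (what is proved, stated in full; the proofs are below) =====
def Claim_equal_project_surcharge_py : Prop := ∀ (project_count : Int), Dom_project_surcharge_py project_count → Spec_project_surcharge_py project_count (project_surcharge_py project_count)

-- ===== LEMMAS AND PROOFS =====

-- ===== VERDICT (by name: the statement is the Claim_ definition above) =====
theorem project_surcharge_py_spec : Claim_equal_project_surcharge_py := by
  intro n _
  unfold Spec_project_surcharge_py project_surcharge_py project_surcharge_py_alt
    FREE_PROJECT_ALLOWANCE PROJECT_PRICE_TIERS
  simp only [surchargeLoop, min_def]
  split_ifs <;> omega
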